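-- pv_equiv track=rewrite | github.com/yootal/CodingTest | 백준/Gold/17609. 회문/회문.py | check
-- ===== SOURCE A (Python) =====
-- def check(s):
--     l = len(s)
--     flag = True
--     for i in range(l//2):
--         if s[i] != s[l-1-i]:
--             flag = False
--             break
--     if not flag:
--         flag2 = True
--         for j in range(l//2-i):
--             if s[i+j] != s[l-1-i-1-j]:
--                 flag2 = False
--                 break
--         flag3 = True
--         for k in range(l//2-i):
--             if s[i+1+k] != s[l-1-i-k]:
--                 flag3 = False
--                 break
--         if flag2 or flag3:
--             return 1
--         else:
--             return 2
--     else: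
--         return 0
-- ===== SOURCE B (Python) =====
-- def check(s):
--     if s == s[::-1]:
--         return 0
--     for k in range(len(s)):
--         t = s[:k] + s[k+1:]
--         if t == t[::-1]:
--             return 1
--     return 2
-- ===== Notes on version B (the rewrite author's own statement) =====
-- stated objective: simpler
-- what changed: Replaces A's first-mismatch index loops (two-pointer scan plus two offset half-window rescans) by a declarative brute force: compare s with its reverse, then test every single-character deletion s[:k]+s[k+1:] against its reverse; correctness rests on the proved fact that one-deletion palindromicity is decided at the first mismatch.
import Mathlib
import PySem

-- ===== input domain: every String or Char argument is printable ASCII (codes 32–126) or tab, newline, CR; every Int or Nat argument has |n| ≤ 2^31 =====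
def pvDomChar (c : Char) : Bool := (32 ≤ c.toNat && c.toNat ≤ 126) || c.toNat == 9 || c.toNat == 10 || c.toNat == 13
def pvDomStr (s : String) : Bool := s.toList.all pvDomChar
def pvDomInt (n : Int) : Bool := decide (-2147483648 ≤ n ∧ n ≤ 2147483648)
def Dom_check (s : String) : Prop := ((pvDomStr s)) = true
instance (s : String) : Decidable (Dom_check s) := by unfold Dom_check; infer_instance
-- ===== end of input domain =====

-- B replaces A's first-mismatch index loops by a declarative brute force: compare s
-- with its reverse, then try every single-character deletion; plainer, O(n^2) vs O(n).

-- ===== PORT A =====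
-- first for-loop: scan i in range(l//2), return the break index (first mismatch) or none
def aLoop1 (cs : List Char) (l : Nat) : Nat → Nat → Option Nat
  | _, 0 => none
  | i, n + 1 =>
      if cs.getD i ' ' ≠ cs.getD (l - 1 - i) ' ' then some i
      else aLoop1 cs l (i + 1) n

-- second for-loop: j in range(l//2-i), comparing s[i+j] with s[l-1-i-1-j] (flag2)
def aInner2 (cs : List Char) (l i : Nat) : Nat → Nat → Bool
  | _, 0 => true
  | j, n + 1 =>
      if cs.getD (i + j) ' ' ≠ cs.getD (l - 1 - i - 1 - j) ' ' then false
      else aInner2 cs l i (j + 1) n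

-- third for-loop: k in range(l//2-i), comparing s[i+1+k] with s[l-1-i-k] (flag3)
def aInner3 (cs : List Char) (l i : Nat) : Nat → Nat → Bool
  | _, 0 => true
  | k, n + 1 =>
      if cs.getD (i + 1 + k) ' ' ≠ cs.getD (l - 1 - i - k) ' ' then false
      else aInner3 cs l i (k + 1) n

def check (s : String) : Int :=
  let cs := s.toList
  let l := cs.length
  match aLoop1 cs l 0 (l / 2) with
  | none => 0                                   -- flag stayed True
  | some i =>                                   -- flag = False, broken at index i
      let flag2 := aInner2 cs l i 0 (l / 2 - i)
      let flag3 := aInner3 cs l i 0 (l / 2 - i)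
      if flag2 || flag3 then 1 else 2

-- ===== PORT B =====
-- for-loop over k in range(len(s)): t = s[:k] + s[k+1:], early-return 1 if t == t[::-1]
def bScan (cs : List Char) (k : Nat) : Int :=
  if _h : k < cs.length then
    let t := cs.take k ++ cs.drop (k + 1)       -- s[:k] + s[k+1:] (for 0 ≤ k < len the slices are take/drop)
    if t = t.reverse then 1 else bScan cs (k + 1)
  else 2
termination_by cs.length - k
decreasing_by omega

def check_alt (s : String) : Int :=
  let cs := s.toList
  if cs = cs.reverse then 0                     -- s == s[::-1]
  else bScan cs 0

-- ===== PRECONDITION & SPEC =====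
def Spec_check (s : String) (out : Int) : Prop := out = check_alt s
instance (s : String) (out : Int) : Decidable (Spec_check s out) := by unfold Spec_check; infer_instance

-- ===== CLAIM (what is proved, stated in full; the proofs are below) =====
def Claim_equal_check : Prop := ∀ (s : String), Dom_check s → Spec_check s (check s)

-- ===== LEMMAS AND PROOFS =====

-- ---- common specification: 0 = palindrome, 1 = palindrome after one deletion, 2 = neither ----
def specF (xs : List Char) : Int :=
  if xs = xs.reverse then 0
  else if ∃ k < xs.length, xs.eraseIdx k = (xs.eraseIdx k).reverse then 1 else 2

-- ---- A-side: two-pointer reformulation (as in A, indices into the fixed list) ----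
def isPal (cs : List Char) (lo hi : Nat) : Bool :=
  if _h : lo < hi then
    if cs.getD lo ' ' ≠ cs.getD hi ' ' then false
    else isPal cs (lo + 1) (hi - 1)
  else true
termination_by hi - lo
decreasing_by omega

def bLoop (cs : List Char) (i j : Nat) : Int :=
  if _h : i < j then
    if cs.getD i ' ' ≠ cs.getD j ' ' then
      if isPal cs (i + 1) j || isPal cs i (j - 1) then 1 else 2
    else bLoop cs (i + 1) (j - 1)
  else 0
termination_by j - i
decreasing_by omega

def palN (cs : List Char) : Nat → Nat → Nat → Bool
  | _, _, 0 => true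
  | lo, hi, n + 1 =>
      if cs.getD lo ' ' ≠ cs.getD hi ' ' then false
      else palN cs (lo + 1) (hi - 1) n

lemma aInner2_eq_palN (cs : List Char) (l i : Nat) :
    ∀ n j, aInner2 cs l i j n = palN cs (i + j) (l - 2 - i - j) n := by
  intro n
  induction n with
  | zero => intro j; rfl
  | succ n ih =>
      intro j
      have h1 : l - 1 - i - 1 - j = l - 2 - i - j := by omega
      have h2 : l - 2 - i - (j + 1) = (l - 2 - i - j) - 1 := by omega
      simp only [aInner2, palN, ih (j + 1), h1]
      rw [h2, show i + (j + 1) = i + j + 1 by omega]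

lemma aInner3_eq_palN (cs : List Char) (l i : Nat) :
    ∀ n k, aInner3 cs l i k n = palN cs (i + 1 + k) (l - 1 - i - k) n := by
  intro n
  induction n with
  | zero => intro k; rfl
  | succ n ih =>
      intro k
      have h2 : l - 1 - i - (k + 1) = (l - 1 - i - k) - 1 := by omega
      simp only [aInner3, palN, ih (k + 1)]
      rw [h2, show i + 1 + (k + 1) = i + 1 + k + 1 by omega]

lemma palN_eq_isPal (cs : List Char) :
    ∀ n lo hi, (2 * n = hi - lo ∨ 2 * n = hi - lo + 1 ∨
        (2 * n = hi - lo + 2 ∧ lo ≤ hi ∧ (hi - lo) % 2 = 0)) →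
    palN cs lo hi n = isPal cs lo hi := by
  intro n
  induction n with
  | zero =>
      intro lo hi h
      have : ¬ lo < hi := by omega
      rw [palN, isPal]
      simp [this]
  | succ n ih =>
      intro lo hi h
      by_cases hlt : lo < hi
      · rw [palN, isPal]
        simp only [hlt, dif_pos]
        rw [ih (lo + 1) (hi - 1) (by omega)]
      · have hn : n = 0 := by omega
        have heq : lo = hi := by omega
        subst hn heq
        rw [palN, isPal]
        simp [palN]

def aResult (cs : List Char) (l i n : Nat) : Int :=
  match aLoop1 cs l i n with
  | none => 0
  | some m =>
      if aInner2 cs l m 0 (l / 2 - m) || aInner3 cs l m 0 (l / 2 - m) then 1 else 2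

lemma bLoop_eq_aResult (cs : List Char) (l : Nat) :
    ∀ n i, i + n = l / 2 → bLoop cs i (l - 1 - i) = aResult cs l i n := by
  intro n
  induction n with
  | zero =>
      intro i hi
      have hlt : ¬ i < l - 1 - i := by omega
      rw [bLoop, aResult]
      simp [hlt, aLoop1]
  | succ n ih =>
      intro i hi
      have hlt : i < l - 1 - i := by omega
      rw [bLoop, aResult]
      simp only [hlt, dif_pos]
      by_cases hc : cs.getD i ' ' ≠ cs.getD (l - 1 - i) ' '
      · have h2 : aInner2 cs l i 0 (l / 2 - i) = isPal cs i (l - 1 - i - 1) := by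
          rw [aInner2_eq_palN]
          rw [show l - 2 - i - 0 = l - 1 - i - 1 by omega, show i + 0 = i by omega]
          apply palN_eq_isPal
          omega
        have h3 : aInner3 cs l i 0 (l / 2 - i) = isPal cs (i + 1) (l - 1 - i) := by
          rw [aInner3_eq_palN]
          rw [show l - 1 - i - 0 = l - 1 - i by omega, show i + 1 + 0 = i + 1 by omega]
          apply palN_eq_isPal
          omega
        rw [if_pos hc, aLoop1, if_pos hc]
        simp only [h2, h3]
        rw [Bool.or_comm]
      · rw [if_neg hc, aLoop1, if_neg hc]
        rw [show l - 1 - i - 1 = l - 1 - (i + 1) by omega]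
        rw [ih (i + 1) (by omega), aResult]

lemma check_eq_bLoop (s : String) :
    check s = bLoop s.toList 0 (s.toList.length - 1) := by
  unfold check
  have := bLoop_eq_aResult s.toList s.toList.length (s.toList.length / 2) 0 (by omega)
  simp only [show s.toList.length - 1 - 0 = s.toList.length - 1 by omega] at this
  rw [this, aResult]

-- ---- windows of the fixed list ----
def win (cs : List Char) (lo hi : Nat) : List Char := (cs.drop lo).take (hi + 1 - lo)

lemma short_pal (t : List Char) (h : t.length ≤ 1) : t = t.reverse := by
  match t with
  | [] => rfl
  | [a] => rfl
  | a :: b :: r => simp at h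

lemma pal_cons_concat (a b : Char) (t : List Char) :
    (a :: (t ++ [b]) = (a :: (t ++ [b])).reverse) ↔ (a = b ∧ t = t.reverse) := by
  rw [List.reverse_cons, List.reverse_append]
  simp only [List.reverse_cons, List.reverse_nil, List.nil_append, List.cons_append,
    List.cons.injEq]
  constructor
  · rintro ⟨rfl, h2⟩
    have := List.append_inj h2 (by simp)
    exact ⟨rfl, this.1⟩
  · rintro ⟨rfl, h⟩
    rw [← h]
    exact ⟨rfl, rfl⟩

lemma win_decomp (cs : List Char) (lo hi : Nat) (h1 : lo < hi) (h2 : hi < cs.length) :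
    win cs lo hi = cs.getD lo ' ' :: (win cs (lo + 1) (hi - 1) ++ [cs.getD hi ' ']) := by
  unfold win
  rw [List.getD_eq_getElem cs ' ' (show lo < cs.length from by omega),
    List.getD_eq_getElem cs ' ' h2]
  rw [List.drop_eq_getElem_cons (show lo < cs.length by omega)]
  rw [show hi + 1 - lo = (hi - lo) + 1 from by omega, List.take_succ_cons]
  rw [show hi - lo = (hi - lo - 1) + 1 from by omega, List.take_add_one]
  rw [List.getElem?_drop, show lo + 1 + (hi - lo - 1) = hi from by omega,
    List.getElem?_eq_getElem h2]
  rw [show hi - 1 + 1 - (lo + 1) = hi - lo - 1 from by omega]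
  simp

lemma win_tail (cs : List Char) (lo hi : Nat) :
    (win cs lo hi).tail = win cs (lo + 1) hi := by
  unfold win
  rw [← List.drop_one, List.drop_take, List.drop_drop]
  congr 1

lemma win_dropLast (cs : List Char) (lo hi : Nat) (h1 : lo < hi) (h2 : hi < cs.length) :
    (win cs lo hi).dropLast = win cs lo (hi - 1) := by
  unfold win
  rw [List.dropLast_eq_take, List.length_take, List.length_drop, List.take_take]
  congr 1
  omega

lemma isPal_eq_win (cs : List Char) :
    ∀ n lo hi, hi - lo ≤ n → hi < cs.length →
      isPal cs lo hi = decide (win cs lo hi = (win cs lo hi).reverse) := by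
  intro n
  induction n with
  | zero =>
      intro lo hi hn hhi
      have hshort : win cs lo hi = (win cs lo hi).reverse := by
        apply short_pal
        unfold win
        simp only [List.length_take, List.length_drop]
        omega
      rw [isPal, dif_neg (by omega)]
      exact (decide_eq_true hshort).symm
  | succ n ih =>
      intro lo hi hn hhi
      by_cases hlt : lo < hi
      · rw [isPal, dif_pos hlt, win_decomp cs lo hi hlt hhi]
        by_cases hc : cs.getD lo ' ' = cs.getD hi ' '
        · rw [if_neg (not_not_intro hc)]
          rw [ih (lo + 1) (hi - 1) (by omega) (by omega)]
          have hiff : (cs.getD lo ' ' :: (win cs (lo + 1) (hi - 1) ++ [cs.getD hi ' ']) =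
              (cs.getD lo ' ' :: (win cs (lo + 1) (hi - 1) ++ [cs.getD hi ' '])).reverse) ↔
              (win cs (lo + 1) (hi - 1) = (win cs (lo + 1) (hi - 1)).reverse) := by
            rw [pal_cons_concat]
            exact ⟨fun h => h.2, fun h => ⟨hc, h⟩⟩
          exact (decide_eq_decide.mpr hiff).symm
        · rw [if_pos hc]
          symm
          rw [decide_eq_false_iff_not, pal_cons_concat]
          rintro ⟨h1, -⟩
          exact hc h1
      · have hshort : win cs lo hi = (win cs lo hi).reverse := by
          apply short_pal
          unfold win
          simp only [List.length_take, List.length_drop]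
          omega
        rw [isPal, dif_neg hlt]
        exact (decide_eq_true hshort).symm

-- ---- list-level two-pointer classifier ----
def tp (xs : List Char) : Int :=
  if _h : 2 ≤ xs.length then
    if xs.headD ' ' = xs.getLastD ' ' then tp xs.tail.dropLast
    else if xs.tail = xs.tail.reverse ∨ xs.dropLast = xs.dropLast.reverse then 1 else 2
  else 0
termination_by xs.length
decreasing_by simp [List.length_dropLast, List.length_tail]; omega

lemma bLoop_eq_tp (cs : List Char) :
    ∀ n lo hi, hi - lo ≤ n → hi < cs.length → bLoop cs lo hi = tp (win cs lo hi) := by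
  intro n
  induction n with
  | zero =>
      intro lo hi hn hhi
      rw [bLoop, dif_neg (by omega), tp, dif_neg]
      unfold win
      simp only [List.length_take, List.length_drop]
      omega
  | succ n ih =>
      intro lo hi hn hhi
      by_cases hlt : lo < hi
      · have hd := win_decomp cs lo hi hlt hhi
        have hlen2 : 2 ≤ (win cs lo hi).length := by
          rw [hd]; simp
        rw [bLoop, dif_pos hlt, tp, dif_pos hlen2]
        have hhd : (win cs lo hi).headD ' ' = cs.getD lo ' ' := by rw [hd]; rfl
        have hlast : (win cs lo hi).getLastD ' ' = cs.getD hi ' ' := by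
          rw [hd, show cs.getD lo ' ' :: (win cs (lo + 1) (hi - 1) ++ [cs.getD hi ' ']) =
            (cs.getD lo ' ' :: win cs (lo + 1) (hi - 1)) ++ [cs.getD hi ' '] from by simp]
          exact List.getLastD_concat ..
        have htail : (win cs lo hi).tail = win cs (lo + 1) hi := win_tail ..
        have hdrop : (win cs lo hi).dropLast = win cs lo (hi - 1) :=
          win_dropLast cs lo hi hlt hhi
        have htd : (win cs lo hi).tail.dropLast = win cs (lo + 1) (hi - 1) := by
          rw [hd]
          simp
        rw [hhd, hlast, htd, htail, hdrop]
        by_cases hc : cs.getD lo ' ' = cs.getD hi ' '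
        · rw [if_neg (not_not_intro hc), if_pos hc]
          exact ih (lo + 1) (hi - 1) (by omega) (by omega)
        · rw [if_pos hc, if_neg hc]
          rw [isPal_eq_win cs (n + 1) (lo + 1) hi (by omega) hhi,
            isPal_eq_win cs (n + 1) lo (hi - 1) (by omega) (by omega)]
          by_cases hP : win cs (lo + 1) hi = (win cs (lo + 1) hi).reverse
          · rw [decide_eq_true hP, Bool.true_or, if_pos rfl, if_pos (Or.inl hP)]
          · by_cases hQ : win cs lo (hi - 1) = (win cs lo (hi - 1)).reverse
            · rw [decide_eq_true hQ, decide_eq_false hP, Bool.false_or,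
                if_pos rfl, if_pos (Or.inr hQ)]
            · rw [decide_eq_false hP, decide_eq_false hQ, Bool.false_or,
                if_neg Bool.false_ne_true,
                if_neg (by rintro (h | h); exacts [hP h, hQ h])]
      · rw [bLoop, dif_neg hlt, tp, dif_neg]
        unfold win
        simp only [List.length_take, List.length_drop]
        omega

-- ---- eraseIdx facts and the one-deletion characterisation ----
lemma hasdel_concat (ys : List Char) (c : Char) (hp : ys ++ [c] = (ys ++ [c]).reverse)
    (hne : ys ≠ []) : ∃ k < ys.length, ys.eraseIdx k = (ys.eraseIdx k).reverse := by
  rcases ys with _ | ⟨d, zs⟩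
  · exact absurd rfl hne
  · rw [List.cons_append, pal_cons_concat] at hp
    exact ⟨0, by simp, by simpa using hp.2⟩

lemma hasdel_cons (a : Char) (ys : List Char) (hp : a :: ys = (a :: ys).reverse)
    (hne : ys ≠ []) : ∃ k < ys.length, ys.eraseIdx k = (ys.eraseIdx k).reverse := by
  rcases List.eq_nil_or_concat ys with h | ⟨zs, d, h⟩
  · exact absurd h hne
  · rw [List.concat_eq_append] at h
    subst h
    rw [pal_cons_concat] at hp
    refine ⟨zs.length, by simp, ?_⟩
    rw [show (zs ++ [d]).eraseIdx zs.length = zs from by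
      simp [List.eraseIdx_eq_take_drop_succ]]
    exact hp.2

lemma del_iff_same (a : Char) (ys : List Char) (hys : ¬ ys = ys.reverse) :
    (∃ k < (a :: (ys ++ [a])).length,
        (a :: (ys ++ [a])).eraseIdx k = ((a :: (ys ++ [a])).eraseIdx k).reverse) ↔
    (∃ k < ys.length, ys.eraseIdx k = (ys.eraseIdx k).reverse) := by
  have hne : ys ≠ [] := by rintro rfl; exact hys rfl
  constructor
  · rintro ⟨k, hk, h⟩
    rcases k with _ | k'
    · rw [List.eraseIdx_cons_zero] at h
      exact hasdel_concat ys a h hne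
    · rw [List.eraseIdx_cons_succ] at h
      simp only [List.length_cons, List.length_append, List.length_cons,
        List.length_nil] at hk
      by_cases hk' : k' < ys.length
      · rw [List.eraseIdx_append_of_lt_length hk'] at h
        rw [pal_cons_concat] at h
        exact ⟨k', hk', h.2⟩
      · have : k' = ys.length := by omega
        subst this
        rw [show (ys ++ [a]).eraseIdx ys.length = ys from by
          simp [List.eraseIdx_eq_take_drop_succ]] at h
        exact hasdel_cons a ys h hne
  · rintro ⟨k, hk, h⟩
    refine ⟨k + 1, by simp; omega, ?_⟩
    rw [List.eraseIdx_cons_succ, List.eraseIdx_append_of_lt_length hk,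
      pal_cons_concat]
    exact ⟨rfl, h⟩

lemma del_iff_diff (a b : Char) (ys : List Char) (hab : a ≠ b) :
    (∃ k < (a :: (ys ++ [b])).length,
        (a :: (ys ++ [b])).eraseIdx k = ((a :: (ys ++ [b])).eraseIdx k).reverse) ↔
    ((ys ++ [b]) = (ys ++ [b]).reverse ∨ (a :: ys) = (a :: ys).reverse) := by
  constructor
  · rintro ⟨k, hk, h⟩
    rcases k with _ | k'
    · rw [List.eraseIdx_cons_zero] at h
      exact Or.inl h
    · rw [List.eraseIdx_cons_succ] at h
      simp only [List.length_cons, List.length_append, List.length_cons,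
        List.length_nil] at hk
      by_cases hk' : k' < ys.length
      · rw [List.eraseIdx_append_of_lt_length hk', pal_cons_concat] at h
        exact absurd h.1 hab
      · have : k' = ys.length := by omega
        subst this
        rw [show (ys ++ [b]).eraseIdx ys.length = ys from by
          simp [List.eraseIdx_eq_take_drop_succ]] at h
        exact Or.inr h
  · rintro (h | h)
    · exact ⟨0, by simp, by simpa using h⟩
    · refine ⟨ys.length + 1, by simp, ?_⟩
      rw [List.eraseIdx_cons_succ,
        show (ys ++ [b]).eraseIdx ys.length = ys from by
          simp [List.eraseIdx_eq_take_drop_succ]]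
      exact h

lemma tp_eq_specF : ∀ (n : Nat) (xs : List Char), xs.length ≤ n → tp xs = specF xs := by
  intro n
  induction n with
  | zero =>
      intro xs hn
      have : xs = [] := List.length_eq_zero_iff.mp (by omega)
      subst this
      rw [tp, dif_neg (by simp)]
      simp [specF]
  | succ n ih =>
      intro xs hn
      by_cases hlen : 2 ≤ xs.length
      · rcases xs with _ | ⟨a, t⟩
        · simp at hlen
        · rcases List.eq_nil_or_concat t with h | ⟨zs, b, h⟩
          · subst h; simp at hlen
          · rw [List.concat_eq_append] at h
            subst h
            rw [tp, dif_pos hlen]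
            have hhd : (a :: (zs ++ [b])).headD ' ' = a := rfl
            have hlast : (a :: (zs ++ [b])).getLastD ' ' = b := by
              rw [show a :: (zs ++ [b]) = (a :: zs) ++ [b] from by simp]
              exact List.getLastD_concat ..
            have htd : (a :: (zs ++ [b])).tail.dropLast = zs := by
              simp
            rw [hhd, hlast, htd]
            by_cases hab : a = b
            · subst hab
              rw [if_pos rfl]
              rw [ih zs (by simp at hn ⊢; omega)]
              have hbig : (a :: (zs ++ [a]) = (a :: (zs ++ [a])).reverse) ↔
                  (zs = zs.reverse) := by
                rw [pal_cons_concat]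
                exact ⟨fun h => h.2, fun h => ⟨rfl, h⟩⟩
              rw [specF, specF]
              by_cases hz : zs = zs.reverse
              · rw [if_pos (hbig.mpr hz), if_pos hz]
              · rw [if_neg (fun h => hz (hbig.mp h)), if_neg hz,
                  if_congr (del_iff_same a zs hz) rfl rfl]
            · rw [if_neg hab]
              have hnot : ¬ (a :: (zs ++ [b]) = (a :: (zs ++ [b])).reverse) :=
                fun h => hab ((pal_cons_concat a b zs).mp h).1
              have ht2 : (a :: (zs ++ [b])).tail = zs ++ [b] := rfl
              have hd2 : (a :: (zs ++ [b])).dropLast = a :: zs := by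
                rw [show a :: (zs ++ [b]) = (a :: zs) ++ [b] from by simp,
                  List.dropLast_concat]
              rw [ht2, hd2, specF, if_neg hnot,
                if_congr (del_iff_diff a b zs hab) rfl rfl]
      · rw [tp, dif_neg hlen]
        rw [specF, if_pos (short_pal xs (by omega))]

-- ---- B side ----
lemma bScan_eq (cs : List Char) :
    ∀ n k, cs.length - k ≤ n →
      bScan cs k =
        if ∃ m < cs.length, k ≤ m ∧ cs.eraseIdx m = (cs.eraseIdx m).reverse
        then 1 else 2 := by
  intro n
  induction n with
  | zero =>
      intro k hn
      rw [bScan, dif_neg (by omega), if_neg]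
      rintro ⟨m, hm2, hm1, -⟩
      omega
  | succ n ih =>
      intro k hn
      by_cases hk : k < cs.length
      · rw [bScan, dif_pos hk]
        simp only [← List.eraseIdx_eq_take_drop_succ]
        by_cases hp : cs.eraseIdx k = (cs.eraseIdx k).reverse
        · rw [if_pos hp, if_pos ⟨k, hk, le_refl k, hp⟩]
        · rw [if_neg hp, ih (k + 1) (by omega)]
          apply if_congr _ rfl rfl
          constructor
          · rintro ⟨m, hm2, hm1, hm3⟩
            exact ⟨m, hm2, by omega, hm3⟩
          · rintro ⟨m, hm2, hm1, hm3⟩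
            rcases Nat.eq_or_lt_of_le hm1 with h | h
            · exact absurd (h ▸ hm3) hp
            · exact ⟨m, hm2, by omega, hm3⟩
      · rw [bScan, dif_neg hk, if_neg]
        rintro ⟨m, hm2, hm1, -⟩
        omega

lemma check_alt_eq_specF (s : String) : check_alt s = specF s.toList := by
  unfold check_alt specF
  by_cases hp : s.toList = s.toList.reverse
  · rw [if_pos hp, if_pos hp]
  · rw [if_neg hp, if_neg hp]
    rw [bScan_eq s.toList s.toList.length 0 (by omega)]
    apply if_congr _ rfl rfl
    constructor
    · rintro ⟨m, hm2, -, hm3⟩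
      exact ⟨m, hm2, hm3⟩
    · rintro ⟨m, hm2, hm3⟩
      exact ⟨m, hm2, Nat.zero_le m, hm3⟩

-- ===== VERDICT (by name: the statement is the Claim_ definition above) =====
theorem check_spec : Claim_equal_check := by
  intro s _
  unfold Spec_check
  rw [check_alt_eq_specF, check_eq_bLoop]
  by_cases hnil : s.toList = []
  · rw [hnil, bLoop, dif_neg (by simp)]
    simp [specF]
  · have hlen : 0 < s.toList.length := List.length_pos_of_ne_nil hnil
    rw [bLoop_eq_tp s.toList s.toList.length 0 (s.toList.length - 1) (by omega) (by omega)]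
    have hw : win s.toList 0 (s.toList.length - 1) = s.toList := by
      unfold win
      rw [List.drop_zero, show s.toList.length - 1 + 1 - 0 = s.toList.length from by omega,
        List.take_length]
    rw [hw, tp_eq_specF s.toList.length s.toList (le_refl _)]
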